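-- pv_equiv track=rewrite | github.com/aqxq/CTF-Writeups | DawgCTF/Crypto/Cantor's Pairadox/script.py | unpair
-- ===== SOURCE A (Python) =====
-- def getTriNumber(n):
--     return n * (n + 1) // 2
--
-- def isqrt(n):
--     """Integer square root using binary search."""
--     low = 1
--     high = n
--     while low <= high:
--         mid = (low + high) // 2
--         if mid * mid <= n:
--             low = mid + 1
--         else:
--             high = mid - 1
--     return high
--
-- def unpair(P):
--     S = isqrt(2 * P)
--
--     while True:
--         T_S = getTriNumber(S)
--         T_S_plus_1 = getTriNumber(S + 1)
--
--         if T_S <= P < T_S_plus_1: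
--             break
--         elif P >= T_S_plus_1:
--             S += 1
--         else:
--             S -= 1
--
--     n2 = P - T_S
--     n1 = S - n2
--     return (n1, n2)
-- ===== SOURCE B (Python) =====
-- def unpair(P):
--     # Binary search directly for the largest w >= 0 with w*(w+1)//2 <= P.
--     lo, hi = 0, P
--     while lo <= hi:
--         mid = (lo + hi) // 2
--         if mid * (mid + 1) // 2 <= P:
--             lo = mid + 1
--         else:
--             hi = mid - 1
--     w = hi
--     n2 = P - w * (w + 1) // 2
--     n1 = w - n2
--     return (n1, n2)
-- ===== Notes on version B (the rewrite author's own statement) =====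
-- stated objective: simpler
-- what changed: Replaced A's isqrt-estimate followed by a +/-1 correction loop with a single binary search that finds the largest w with w*(w+1)//2 <= P directly; no estimate and no correction loop.
import Mathlib
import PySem

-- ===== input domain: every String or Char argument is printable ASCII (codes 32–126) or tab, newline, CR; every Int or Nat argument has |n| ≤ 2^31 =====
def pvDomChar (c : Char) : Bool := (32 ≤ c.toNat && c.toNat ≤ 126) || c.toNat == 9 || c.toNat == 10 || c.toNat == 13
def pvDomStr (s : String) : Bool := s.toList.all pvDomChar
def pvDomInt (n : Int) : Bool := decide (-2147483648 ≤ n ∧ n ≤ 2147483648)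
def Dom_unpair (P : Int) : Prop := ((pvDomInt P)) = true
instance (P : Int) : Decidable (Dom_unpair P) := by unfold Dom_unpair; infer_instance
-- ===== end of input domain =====

-- B replaces A's isqrt-estimate + ±1 correction loop with one binary search for w directly (simpler).

-- ===== PORT A =====
def getTriNumber (n : Int) : Int := PySem.Int.floordiv (n * (n + 1)) 2

-- binary-search while-loop of A's isqrt, recursion on the shrinking interval
def isqrtGo (low high n : Int) : Int :=
  if _h : low ≤ high then
    let mid := PySem.Int.floordiv (low + high) 2
    if mid * mid ≤ n then isqrtGo (mid + 1) high n else isqrtGo low (mid - 1) n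
  else high
termination_by (high + 1 - low).toNat
decreasing_by
  · have := PySem.Int.floordiv_two_mid_bounds _h; omega
  · have := PySem.Int.floordiv_two_mid_bounds _h; omega

def isqrt (n : Int) : Int := isqrtGo 1 n n

-- A's 'while True' correction loop; fuel only makes it total (on Pre_ the fuel is never exhausted)
def unpairGo (P : Int) : Nat → Int → Int × Int
  | 0, S => (S - (P - getTriNumber S), P - getTriNumber S)
  | fuel + 1, S =>
    let T_S := getTriNumber S
    let T_S_plus_1 := getTriNumber (S + 1)
    if T_S ≤ P ∧ P < T_S_plus_1 then (S - (P - T_S), P - T_S)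
    else if P ≥ T_S_plus_1 then unpairGo P fuel (S + 1)
    else unpairGo P fuel (S - 1)

def unpair (P : Int) : Int × Int :=
  unpairGo P (2 * P + 2).toNat (isqrt (2 * P))

-- ===== PORT B =====
-- B's while-loop: binary search for the largest w with w*(w+1)//2 ≤ P
def bsGo (P lo hi : Int) : Int :=
  if _h : lo ≤ hi then
    let mid := PySem.Int.floordiv (lo + hi) 2
    if PySem.Int.floordiv (mid * (mid + 1)) 2 ≤ P then bsGo P (mid + 1) hi else bsGo P lo (mid - 1)
  else hi
termination_by (hi + 1 - lo).toNat
decreasing_by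
  · have := PySem.Int.floordiv_two_mid_bounds _h; omega
  · have := PySem.Int.floordiv_two_mid_bounds _h; omega

def unpair_alt (P : Int) : Int × Int :=
  let w := bsGo P 0 P
  let n2 := P - PySem.Int.floordiv (w * (w + 1)) 2
  (w - n2, n2)

-- ===== PRECONDITION & SPEC =====
-- Pre_ excludes P < 0, on which A's correction loop never terminates (it decrements S forever).
def Pre_unpair (P : Int) : Prop := 0 ≤ P
instance (P : Int) : Decidable (Pre_unpair P) := by unfold Pre_unpair; infer_instance
def pvWitness_unpair : Int := 7

def Spec_unpair (P : Int) (out : Int × Int) : Prop := out = unpair_alt P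
instance (P : Int) (out : Int × Int) : Decidable (Spec_unpair P out) := by unfold Spec_unpair; infer_instance

-- ===== CLAIM (what is proved, stated in full; the proofs are below) =====
def Claim_equal_unpair : Prop := ∀ (P : Int), Dom_unpair P → Pre_unpair P → Spec_unpair P (unpair P)

-- ===== LEMMAS AND PROOFS =====

-- 2 * (w*(w+1) // 2) = w*(w+1): the product is even, so the floor division is exact
theorem two_mul_tri (w : Int) : 2 * PySem.Int.floordiv (w * (w + 1)) 2 = w * (w + 1) := by
  rw [PySem.Int.floordiv_eq_ediv_of_pos (by norm_num : (0:Int) < 2)]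
  exact Int.mul_ediv_cancel' (Int.even_mul_succ_self w).two_dvd

theorem tri_le_iff (w P : Int) : getTriNumber w ≤ P ↔ w * (w + 1) ≤ 2 * P := by
  unfold getTriNumber
  constructor
  · intro h; have := two_mul_tri w; nlinarith
  · intro h; have := two_mul_tri w; nlinarith

theorem lt_tri_iff (w P : Int) : P < getTriNumber w ↔ 2 * P < w * (w + 1) := by
  have := tri_le_iff w P; omega

-- a break point of A's loop is unique (for 0 ≤ P)
theorem good_unique (P w w' : Int) (_hP : 0 ≤ P)
    (h1 : getTriNumber w ≤ P) (h2 : P < getTriNumber (w + 1))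
    (h3 : getTriNumber w' ≤ P) (h4 : P < getTriNumber (w' + 1)) : w = w' := by
  rw [tri_le_iff] at h1 h3
  rw [lt_tri_iff] at h2 h4
  -- break points are nonnegative
  have hw : 0 ≤ w := by nlinarith
  have hw' : 0 ≤ w' := by nlinarith
  by_contra hne
  rcases lt_or_gt_of_ne hne with h | h
  · nlinarith
  · nlinarith

-- the final-interval bounds of A's isqrt binary search
theorem isqrtGo_bounds (n : Int) :
    ∀ low high, 1 ≤ low → low ≤ high + 1 → high ≤ n →
      low - 1 ≤ isqrtGo low high n ∧ isqrtGo low high n ≤ high := by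
  intro low high
  induction low, high using isqrtGo.induct (n := n) with
  | case1 low high hle mid hmid ih =>
    intro h1 h2 h3
    have hb := PySem.Int.floordiv_two_mid_bounds hle
    rw [isqrtGo, dif_pos hle]
    simp only
    rw [if_pos hmid]
    rw [show PySem.Int.floordiv (low + high) 2 = mid from rfl] at hb ⊢
    have := ih (by omega) (by omega) h3
    omega
  | case2 low high hle mid hmid ih =>
    intro h1 h2 h3
    have hb := PySem.Int.floordiv_two_mid_bounds hle
    rw [isqrtGo, dif_pos hle]
    simp only
    rw [if_neg hmid]
    rw [show PySem.Int.floordiv (low + high) 2 = mid from rfl] at hb ⊢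
    have := ih h1 (by omega) (by omega)
    omega
  | case3 low high hle =>
    intro h1 h2 h3
    rw [isqrtGo, dif_neg hle]
    omega

-- A's correction loop reaches the unique break point when the fuel covers the distance
theorem unpairGo_eq (P w : Int) (hP : 0 ≤ P)
    (hw1 : getTriNumber w ≤ P) (hw2 : P < getTriNumber (w + 1)) :
    ∀ (fuel : Nat) (S : Int), 0 ≤ S → (w - S).natAbs ≤ fuel →
      unpairGo P fuel S = (w - (P - getTriNumber w), P - getTriNumber w) := by
  have hw0 : 0 ≤ w := by
    have h1 := (tri_le_iff w P).mp hw1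
    have h2 := (lt_tri_iff (w + 1) P).mp hw2
    nlinarith
  intro fuel
  induction fuel with
  | zero =>
    intro S hS hfuel
    have : S = w := by omega
    subst this
    simp [unpairGo]
  | succ fuel ih =>
    intro S hS hfuel
    simp only [unpairGo]
    by_cases hbreak : getTriNumber S ≤ P ∧ P < getTriNumber (S + 1)
    · rw [if_pos hbreak]
      have : S = w := good_unique P S w hP hbreak.1 hbreak.2 hw1 hw2
      subst this; rfl
    · rw [if_neg hbreak]
      -- S ≠ w, and the step moves S toward w
      have hSne : S ≠ w := by intro h; exact hbreak (h ▸ ⟨hw1, hw2⟩)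
      rcases lt_or_gt_of_ne hSne with hlt | hgt
      · -- S < w : P ≥ T_{S+1} since T_{S+1} ≤ T_w ≤ P (monotone on S+1 ≥ 0 … w)
        have hmono : (S + 1) * (S + 1 + 1) ≤ w * (w + 1) := by nlinarith
        have hstep : P ≥ getTriNumber (S + 1) := by
          rw [ge_iff_le, tri_le_iff]
          have := (tri_le_iff w P).mp hw1
          omega
        rw [if_pos hstep]
        exact ih (S + 1) (by omega) (by omega)
      · -- S > w : P < T_S since P < T_{w+1} ≤ T_S
        have hmono : (w + 1) * (w + 1 + 1) ≤ S * (S + 1) := by nlinarith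
        have hstep : ¬ P ≥ getTriNumber (S + 1) := by
          have hPS : P < getTriNumber S := by
            rw [lt_tri_iff]
            have := (lt_tri_iff (w + 1) P).mp hw2
            omega
          have hSS : getTriNumber S ≤ getTriNumber (S + 1) := by
            rw [tri_le_iff]
            have h2 := two_mul_tri (S + 1)
            unfold getTriNumber
            nlinarith
          omega
        rw [if_neg hstep]
        exact ih (S - 1) (by omega) (by omega)

-- B's binary search lands on a break point
theorem bsGo_good (P : Int) (_hP : 0 ≤ P) :
    ∀ lo hi, 0 ≤ lo → lo ≤ hi + 1 →
      (lo - 1) * lo ≤ 2 * P → 2 * P < (hi + 1) * (hi + 2) →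
      getTriNumber (bsGo P lo hi) ≤ P ∧ P < getTriNumber (bsGo P lo hi + 1) := by
  intro lo hi
  induction lo, hi using bsGo.induct (P := P) with
  | case1 lo hi hle mid hmid ih =>
    intro h0 hlh hlow hhigh
    have hb := PySem.Int.floordiv_two_mid_bounds hle
    rw [bsGo, dif_pos hle]
    simp only
    rw [if_pos hmid]
    refine ih (by omega) (by omega) ?_ hhigh
    have e1 := (tri_le_iff mid P).mp hmid
    have e2 : (mid + 1 - 1) * (mid + 1) = mid * (mid + 1) := by ring
    omega
  | case2 lo hi hle mid hmid ih =>
    intro h0 hlh hlow hhigh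
    have hb := PySem.Int.floordiv_two_mid_bounds hle
    rw [bsGo, dif_pos hle]
    simp only
    rw [if_neg hmid]
    refine ih h0 (by omega) hlow ?_
    have e1 := (lt_tri_iff mid P).mp (by unfold getTriNumber; omega : P < getTriNumber mid)
    have e2 : (mid - 1 + 1) * (mid - 1 + 2) = mid * (mid + 1) := by ring
    omega
  | case3 lo hi hle =>
    intro h0 hlh hlow hhigh
    rw [bsGo, dif_neg hle]
    have hlo : lo = hi + 1 := by omega
    constructor
    · rw [tri_le_iff]
      have e1 : (lo - 1) * lo = hi * (hi + 1) := by rw [hlo]; ring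
      omega
    · rw [lt_tri_iff]
      have e1 : (hi + 1) * (hi + 2) = (hi + 1) * (hi + 1 + 1) := by ring
      omega

-- ===== VERDICT (by name: the statement is the Claim_ definition above) =====
theorem unpair_spec : Claim_equal_unpair := by
  intro P _hDom hP
  unfold Spec_unpair unpair unpair_alt
  simp only
  have hP' : (0 : Int) ≤ P := hP
  -- B's w is a break point
  have hw := bsGo_good P hP' 0 P (le_refl 0) (by omega) (by nlinarith)
    (by nlinarith [sq_nonneg P])
  set w := bsGo P 0 P with hwdef
  -- A's starting point is in [0, 2P]
  have hstart : 0 ≤ isqrt (2 * P) ∧ isqrt (2 * P) ≤ 2 * P := by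
    unfold isqrt
    rcases eq_or_lt_of_le hP' with h | h
    · rw [← h]
      norm_num
      rw [isqrtGo]
      norm_num
    · have := isqrtGo_bounds (2 * P) 1 (2 * P) (by omega) (by omega) (by omega)
      omega
  -- w is within fuel distance
  have hw0 : 0 ≤ w := by
    have h1 := (tri_le_iff w P).mp hw.1
    have h2 := (lt_tri_iff (w + 1) P).mp hw.2
    nlinarith
  have hwub : w ≤ P := by
    have h1 := (tri_le_iff w P).mp hw.1
    nlinarith [sq_nonneg w]
  rw [unpairGo_eq P w hP' hw.1 hw.2 (2 * P + 2).toNat (isqrt (2 * P)) hstart.1 (by omega)]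
  rfl
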